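-- pv_equiv track=rewrite | github.com/MattyO/katas | bowling/bowling.py | new_score
-- ===== SOURCE A (Python) =====
-- def new_score(frames):
--     zipp = [[], frames]
--     score = 0
--
--     current_frame = []
--     while len(zipp[1]) > 0:
--         zipp[0] = [zipp[1].pop(0)] + zipp[0]
--         current_frame = zipp[0][0]
--
--         if len(zipp[0]) == 11:
--             break;
--         score += sum(current_frame)
--         if current_frame[0] != 10 and sum(current_frame) == 10:
--             next_throws = filter(lambda x: x != 0, sum(zipp[1], []))
--             score += next(next_throws, 0)
--         if current_frame[0] == 10:
--             next_throws = filter(lambda x: x != 0, sum(zipp[1], []))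
--             extra_score = next(next_throws, 0) + next(next_throws, 0)
--             score += extra_score
--
--     return score
-- ===== SOURCE B (Python) =====
-- def new_score(frames):
--     # Score only the first 10 frames; fetch each bonus by scanning just far enough
--     # past the frame for the next one/two nonzero throws (bounded lookahead).
--     score = 0
--     for i in range(min(len(frames), 10)):
--         f = frames[i]
--         score += sum(f)
--         need = 2 if f[0] == 10 else (1 if sum(f) == 10 else 0)
--         j = i + 1
--         while need > 0 and j < len(frames):
--             for t in frames[j]:
--                 if t != 0:
--                     score += t
--                     need -= 1
--                     if need == 0:
--                         break
--             j += 1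
--     return score
-- ===== Notes on version B (the rewrite author's own statement) =====
-- stated objective: alternative
-- what changed: B iterates only the first ten frames and scans just far enough past each frame for its one/two nonzero bonus throws, instead of A's pop-from-front loop with a sum(rest,[]) re-flatten of the entire remaining list at every bonus frame; B does not mutate its argument.
import Mathlib
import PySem

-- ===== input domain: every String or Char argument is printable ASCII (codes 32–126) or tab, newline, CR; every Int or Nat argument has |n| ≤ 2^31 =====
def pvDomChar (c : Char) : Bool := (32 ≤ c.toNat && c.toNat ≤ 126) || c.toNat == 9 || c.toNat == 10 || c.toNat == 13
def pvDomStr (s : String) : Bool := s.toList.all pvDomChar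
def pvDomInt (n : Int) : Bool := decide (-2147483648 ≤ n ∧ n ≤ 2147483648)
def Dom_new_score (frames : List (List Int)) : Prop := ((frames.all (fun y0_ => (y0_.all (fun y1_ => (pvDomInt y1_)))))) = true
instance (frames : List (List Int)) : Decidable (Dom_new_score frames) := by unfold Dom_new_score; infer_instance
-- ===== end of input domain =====

-- B scores only the first ten frames and scans just far enough past each frame for its bonus
-- throws, instead of A's pop-from-front and re-flatten of the whole remaining list per frame;
-- A mutates its argument (pop) while B does not: the equivalence is about the return value only.

-- ===== PORT A =====
-- literal port of A's while-loop: zipp0 = frames popped so far (front of `zipp` reversed-in),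
-- rest = zipp[1]; `f.headD 0` stands for Python's f[0], exact on Pre_ (frame nonempty there).
def newScoreLoopA : List (List Int) → List (List Int) → Int → Int
  | _, [], score => score
  | zipp0, f :: rest, score =>
    let zipp0' := f :: zipp0
    if zipp0'.length = 11 then score
    else
      let s1 := score + f.sum
      let s2 := if f.headD 0 ≠ 10 ∧ f.sum = 10 then
          s1 + ((rest.flatten.filter (fun x => x != 0)).headD 0) else s1
      let s3 := if f.headD 0 = 10 then
          s2 + (((rest.flatten.filter (fun x => x != 0)).headD 0)
              + (((rest.flatten.filter (fun x => x != 0)).drop 1).headD 0)) else s2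
      newScoreLoopA zipp0' rest s3

def new_score (frames : List (List Int)) : Int := newScoreLoopA [] frames 0

-- ===== PORT B =====
-- B's inner `for t in frames[j]` with its need-exhausted break:
-- returns (bonus added from this frame, remaining need).
def scanFrameB : List Int → Nat → Int × Nat
  | [], need => (0, need)
  | t :: ts, need =>
    if t != 0 then
      let need' := need - 1
      if need' = 0 then (t, 0)  -- break
      else
        let r := scanFrameB ts need'
        (t + r.1, r.2)
    else scanFrameB ts need

-- B's `while need > 0 and j < len(frames)` loop over the suffix after frame i.
def bonusLoopB : List (List Int) → Nat → Int
  | [], _ => 0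
  | g :: rest, need =>
    if need = 0 then 0
    else
      let r := scanFrameB g need
      r.1 + bonusLoopB rest r.2

-- B's `for i in range(min(len(frames), 10))`: recursion carrying the frame index.
def mainLoopB : List (List Int) → Nat → Int
  | [], _ => 0
  | f :: rest, i =>
    if i < 10 then
      let need : Nat := if f.headD 0 = 10 then 2 else if f.sum = 10 then 1 else 0
      f.sum + bonusLoopB rest need + mainLoopB rest (i + 1)
    else 0

def new_score_alt (frames : List (List Int)) : Int := mainLoopB frames 0

-- ===== PRECONDITION & SPEC =====
-- Pre_ excludes frames with an empty frame among the first ten: there both Pythons raise IndexError (f[0]).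
def Pre_new_score (frames : List (List Int)) : Prop := ∀ f ∈ frames.take 10, f ≠ []
instance (frames : List (List Int)) : Decidable (Pre_new_score frames) := by
  unfold Pre_new_score; infer_instance
def pvWitness_new_score : List (List Int) := [[10, 0], [3, 7], [2, 5]]

def Spec_new_score (frames : List (List Int)) (out : Int) : Prop := out = new_score_alt frames
instance (frames : List (List Int)) (out : Int) : Decidable (Spec_new_score frames out) := by unfold Spec_new_score; infer_instance

-- ===== CLAIM (what is proved, stated in full; the proofs are below) =====
def Claim_equal_new_score : Prop := ∀ (frames : List (List Int)), Dom_new_score frames → Pre_new_score frames → Spec_new_score frames (new_score frames)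

-- ===== LEMMAS AND PROOFS =====

-- closed form of B's inner frame scan (need > 0 on entry, as in B)
lemma scanFrameB_eq (g : List Int) : ∀ need : Nat, 0 < need →
    scanFrameB g need =
      (((g.filter (fun x => x != 0)).take need).sum,
        need - (g.filter (fun x => x != 0)).length) := by
  induction g with
  | nil => intro need _; simp [scanFrameB]
  | cons t ts ih =>
    intro need hpos
    by_cases ht : (t != 0) = true
    · simp only [scanFrameB, List.filter_cons, ht, if_pos]
      by_cases h1 : need - 1 = 0
      · have : need = 1 := by omega
        subst this
        simp
      · rw [if_neg h1, ih (need - 1) (by omega)]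
        obtain ⟨n', rfl⟩ : ∃ n', need = n' + 1 := ⟨need - 1, by omega⟩
        simp [List.take_succ_cons]
        try omega
    · simp only [scanFrameB, List.filter_cons, ht]
      simp only [Bool.false_eq_true, if_false]
      exact ih need hpos
lemma sum_take_append (a b : List Int) (n : Nat) :
    (((a ++ b).take n).sum) = ((a.take n).sum) + ((b.take (n - a.length)).sum) := by
  rw [List.take_append, List.sum_append]

-- closed form of B's while loop: the first `need` nonzero throws of the flattened suffix
lemma bonusLoopB_eq (rest : List (List Int)) : ∀ need : Nat,
    bonusLoopB rest need = ((rest.flatten.filter (fun x => x != 0)).take need).sum := by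
  induction rest with
  | nil => intro need; simp [bonusLoopB]
  | cons g rest ih =>
    intro need
    by_cases h0 : need = 0
    · simp [bonusLoopB, h0]
    · simp only [bonusLoopB, if_neg h0, scanFrameB_eq g need (by omega), ih,
        List.flatten_cons, List.filter_append]
      rw [sum_take_append]

lemma sum_take_one' (l : List Int) : (l.take 1).sum = l.headD 0 := by
  cases l <;> simp

lemma sum_take_two' (l : List Int) :
    (l.take 2).sum = l.headD 0 + (l.drop 1).headD 0 := by
  match l with
  | [] => simp
  | [a] => simp
  | a :: b :: t => simp [List.take]

lemma loopA_eq (rest : List (List Int)) :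
    ∀ (zipp0 : List (List Int)) (score : Int), zipp0.length ≤ 10 →
      newScoreLoopA zipp0 rest score = score + mainLoopB rest zipp0.length := by
  induction rest with
  | nil => intro zipp0 score _; simp [newScoreLoopA, mainLoopB]
  | cons f rest ih =>
    intro zipp0 score hle
    by_cases h10 : zipp0.length = 10
    · -- A breaks at the 11th frame; B's range stops at index 10
      simp only [newScoreLoopA, mainLoopB]
      rw [if_pos (by simp [h10]), if_neg (by omega)]
      ring
    · have hlt : zipp0.length < 10 := by omega
      simp only [newScoreLoopA, mainLoopB]
      rw [if_neg (by simp; omega)]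
      rw [ih (f :: zipp0) _ (by simp; omega)]
      simp only [List.length_cons, if_pos hlt, bonusLoopB_eq]
      set l := rest.flatten.filter (fun x => x != 0) with hl
      split_ifs with h1 h2 h2 h3 <;>
        first
          | tauto
          | (rw [sum_take_one']; ring)
          | (rw [sum_take_two']; ring)
          | (simp; ring)

-- ===== VERDICT (by name: the statement is the Claim_ definition above) =====
theorem new_score_spec : Claim_equal_new_score := by
  intro frames _ _
  show new_score frames = new_score_alt frames
  unfold new_score new_score_alt
  simpa using loopA_eq frames [] 0 (by simp)
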